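-- pv_equiv track=rewrite | github.com/vincepmartin/leetcode | python/1165-single-keyboard-easy/solution.py | calculateTime2
-- ===== SOURCE A (Python) =====
-- def calculateTime2(keyboard: str, word: str) -> int:
--     pos = 0
--     totalMoves = 0
--     keyDict = {}
--     # Put keyboard into a dict key -> pos
--     for i in range(0, len(keyboard)):
--         keyDict[keyboard[i]] = i
--
--     for c in word:
--         totalMoves += abs(keyDict[c] - pos)
--         pos += keyDict[c] - pos
--
--     return totalMoves
-- ===== SOURCE B (Python) =====
-- def calculateTime2(keyboard: str, word: str) -> int:
--     keyDict = {}
--     for i in range(0, len(keyboard)):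
--         keyDict[keyboard[i]] = i
--     stops = [0] + [keyDict[c] for c in word]
--     total = 0
--     # Count, for each gap between adjacent keys k and k+1, how many moves cross it;
--     # the total distance is the total number of gap crossings.
--     for k in range(len(keyboard) - 1):
--         for a, b in zip(stops, stops[1:]):
--             if min(a, b) <= k < max(a, b):
--                 total += 1
--     return total
-- ===== Notes on version B (the rewrite author's own statement) =====
-- stated objective: alternative
-- what changed: Replaces summing per-move distances with a gap-crossing count: for every gap k between adjacent keyboard positions it counts how many consecutive moves cross that gap; the total number of crossings equals the total distance.
import Mathlib
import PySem

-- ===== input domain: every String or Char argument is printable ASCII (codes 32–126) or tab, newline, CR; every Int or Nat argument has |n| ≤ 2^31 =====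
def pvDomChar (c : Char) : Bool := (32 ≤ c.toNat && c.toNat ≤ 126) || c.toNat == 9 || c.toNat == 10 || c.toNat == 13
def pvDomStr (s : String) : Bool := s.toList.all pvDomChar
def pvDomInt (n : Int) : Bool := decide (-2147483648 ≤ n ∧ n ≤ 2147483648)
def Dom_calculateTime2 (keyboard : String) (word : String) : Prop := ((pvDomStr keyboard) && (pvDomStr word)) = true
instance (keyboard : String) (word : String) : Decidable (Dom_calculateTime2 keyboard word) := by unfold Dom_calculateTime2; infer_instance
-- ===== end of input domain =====

-- B replaces A's running-distance accumulator by a gap-crossing count: each unit of distance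
-- is one crossing of a gap between adjacent keyboard positions (alternative algorithm, higher cost).

-- ===== PORT A =====
-- state is (totalMoves, pos); keyboard[i] is exact via PySem.List.pyGetD on toList (i is always in range here)
def calculateTime2 (keyboard : String) (word : String) : Int :=
  let keyDict : PySem.Dict Char Int :=
    (PySem.List.pyRange 0 (PySem.Str.len keyboard) 1).foldl
      (fun d i => d.insert (PySem.List.pyGetD keyboard.toList i ' ') i) PySem.Dict.empty
  let st := word.toList.foldl
      (fun (st : Int × Int) c =>
        (st.1 + |keyDict.getD c 0 - st.2|, st.2 + (keyDict.getD c 0 - st.2)))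
      (0, 0)
  st.1

-- ===== PORT B =====
def calculateTime2_alt (keyboard : String) (word : String) : Int :=
  let keyDict : PySem.Dict Char Int :=
    (PySem.List.pyRange 0 (PySem.Str.len keyboard) 1).foldl
      (fun d i => d.insert (PySem.List.pyGetD keyboard.toList i ' ') i) PySem.Dict.empty
  let stops : List Int := 0 :: word.toList.map (fun c => keyDict.getD c 0)
  (PySem.List.pyRange 0 (PySem.Str.len keyboard - 1) 1).foldl
    (fun total k =>
      (stops.zip stops.tail).foldl
        (fun total q => if min q.1 q.2 ≤ k ∧ k < max q.1 q.2 then total + 1 else total)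
        total)
    0

-- ===== PRECONDITION & SPEC =====
-- Pre_ excludes exactly the inputs where A raises KeyError: a word character absent from keyboard.
def Pre_calculateTime2 (keyboard : String) (word : String) : Prop :=
  (word.toList.all (fun c => keyboard.toList.contains c)) = true
instance (keyboard : String) (word : String) : Decidable (Pre_calculateTime2 keyboard word) := by unfold Pre_calculateTime2; infer_instance

def pvWitness_calculateTime2 : String × String := ("abcdef", "cba")

def Spec_calculateTime2 (keyboard : String) (word : String) (out : Int) : Prop := out = calculateTime2_alt keyboard word
instance (keyboard : String) (word : String) (out : Int) : Decidable (Spec_calculateTime2 keyboard word out) := by unfold Spec_calculateTime2; infer_instance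

-- ===== CLAIM (what is proved, stated in full; the proofs are below) =====
def Claim_equal_calculateTime2 : Prop := ∀ (keyboard : String) (word : String), Dom_calculateTime2 keyboard word → Pre_calculateTime2 keyboard word → Spec_calculateTime2 keyboard word (calculateTime2 keyboard word)

-- ===== LEMMAS AND PROOFS =====

-- A's stateful accumulator equals the sum of consecutive absolute differences
lemma loop_eq_pairsum (f : Char → Int) (cs : List Char) :
    ∀ (t p : Int),
      (cs.foldl (fun (st : Int × Int) c =>
          (st.1 + |f c - st.2|, st.2 + (f c - st.2))) (t, p)).1
      = t + (((p :: cs.map f).zip (cs.map f)).map (fun q => |q.2 - q.1|)).sum := by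
  induction cs with
  | nil => intro t p; simp [List.zip_nil_right]
  | cons c cs ih =>
    intro t p
    simp only [List.foldl_cons, List.map_cons, List.zip_cons_cons, List.sum_cons]
    rw [ih (t + |f c - p|) (p + (f c - p))]
    have hfc : p + (f c - p) = f c := by ring
    rw [hfc]; ring

-- any value stored by the index-insert loop either is the default or was one of the inserted indices
lemma getD_fold_insert (f : Int → Char) (l : List Int) (d : PySem.Dict Char Int) (c : Char) :
    (l.foldl (fun d i => d.insert (f i) i) d).getD c 0 = d.getD c 0
    ∨ (l.foldl (fun d i => d.insert (f i) i) d).getD c 0 ∈ l := by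
  induction l generalizing d with
  | nil => exact Or.inl rfl
  | cons i l ih =>
    simp only [List.foldl_cons]
    rcases ih (d.insert (f i) i) with h | h
    · rw [h, PySem.Dict.getD_insert]
      split_ifs with hc
      · exact Or.inr (List.mem_cons_self)
      · exact Or.inl rfl
    · exact Or.inr (List.mem_cons_of_mem _ h)

-- 0/1-indicator sum over range N counts the integers in [lo, hi)
lemma ind_range_sum (N : Nat) (lo hi : Int) (h0 : 0 ≤ lo) (hlo : lo ≤ hi) (hhi : hi ≤ N) :
    ((List.range N).map (fun k : Nat => if lo ≤ (k : Int) ∧ (k : Int) < hi then (1 : Int) else 0)).sum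
      = hi - lo := by
  induction N with
  | zero => simp at hhi ⊢; omega
  | succ N ih =>
    rw [List.range_succ, List.map_append, List.sum_append]
    by_cases h : hi ≤ N
    · rw [ih h]
      have hN : ¬ ((N : Int) < hi) := by omega
      simp [hN]
    · have h1 : hi = (N : Int) + 1 := by push_cast at hhi; omega
      by_cases h2 : lo ≤ (N : Int)
      · have hN : lo ≤ (N : Int) ∧ (N : Int) < hi := ⟨h2, by omega⟩
        have hrw : ∀ k : Nat, k ∈ List.range N →
            (if lo ≤ (k : Int) ∧ (k : Int) < hi then (1 : Int) else 0)
            = (if lo ≤ (k : Int) ∧ (k : Int) < (N : Int) then (1 : Int) else 0) := by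
          intro k hk
          have := List.mem_range.mp hk
          split_ifs with hA hB hB <;> try rfl
          · exact absurd ⟨hA.1, by omega⟩ hB
          · exact absurd ⟨hB.1, by omega⟩ hA
        rw [List.map_congr_left hrw, ind_range_sum N lo N h0 h2 le_rfl]
        simp [hN]; omega
      · have hrw : ∀ k : Nat, k ∈ List.range N →
            (if lo ≤ (k : Int) ∧ (k : Int) < hi then (1 : Int) else 0) = 0 := by
          intro k hk
          have := List.mem_range.mp hk
          split_ifs with hA
          · exact absurd hA.1 (by omega)
          · rfl
        rw [List.map_congr_left hrw]
        have hN : ¬ (lo ≤ (N : Int)) := h2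
        simp [hN]
        omega

-- swap a double sum
lemma sum_sum_comm {α β : Type} (l1 : List α) (l2 : List β) (f : α → β → Int) :
    (l1.map (fun a => (l2.map (fun b => f a b)).sum)).sum
      = (l2.map (fun b => (l1.map (fun a => f a b)).sum)).sum := by
  induction l1 with
  | nil => simp
  | cons a l1 ih =>
    simp only [List.map_cons, List.sum_cons, ih]
    rw [← List.sum_map_add]

-- crossings of the gaps 0..n-2 by a move between positions a and b equal the move's length
lemma crossings (n a b : Int) (ha0 : 0 ≤ a) (hb0 : 0 ≤ b)
    (ha : a ≤ max 0 (n - 1)) (hb : b ≤ max 0 (n - 1)) :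
    ((PySem.List.pyRange 0 (n - 1) 1).map
        (fun k => if min a b ≤ k ∧ k < max a b then (1 : Int) else 0)).sum = |b - a| := by
  rw [PySem.List.pyRange_one]
  simp only [zero_add, List.map_map]
  have hsum := ind_range_sum ((n - 1 - 0).toNat) (min a b) (max a b)
    (by omega) (by omega) (by omega)
  have hcomp : ((fun k => if min a b ≤ k ∧ k < max a b then (1 : Int) else 0) ∘ (fun k : Nat => (k : Int)))
      = (fun k : Nat => if min a b ≤ (k : Int) ∧ (k : Int) < max a b then (1 : Int) else 0) := rfl
  rw [hcomp, hsum]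
  rcases le_total a b with h | h
  · rw [min_eq_left h, max_eq_right h, abs_of_nonneg (by omega)]
  · rw [min_eq_right h, max_eq_left h, abs_of_nonpos (by omega)]
    ring

-- ===== VERDICT (by name: the statement is the Claim_ definition above) =====
theorem calculateTime2_spec : Claim_equal_calculateTime2 := by
  intro keyboard word _ _
  unfold Spec_calculateTime2 calculateTime2 calculateTime2_alt
  simp only [PySem.Str.len_eq, List.tail_cons]
  set n : Int := (keyboard.toList.length : Int) with hn
  set kd : PySem.Dict Char Int :=
    (PySem.List.pyRange 0 n 1).foldl
      (fun d i => d.insert (PySem.List.pyGetD keyboard.toList i ' ') i) PySem.Dict.empty with hkd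
  set f : Char → Int := fun c => kd.getD c 0 with hf
  set stops : List Int := 0 :: word.toList.map f with hstops
  set pairs : List (Int × Int) := stops.zip (word.toList.map f) with hpairs
  -- every stop is a valid position (or 0)
  have hbound : ∀ x ∈ stops, 0 ≤ x ∧ x ≤ max 0 (n - 1) := by
    intro x hx
    rw [hstops] at hx
    rcases List.mem_cons.mp hx with rfl | hx
    · exact ⟨le_rfl, le_max_left _ _⟩
    · obtain ⟨c, _, rfl⟩ := List.mem_map.mp hx
      simp only [hf]
      rcases getD_fold_insert (fun i => PySem.List.pyGetD keyboard.toList i ' ')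
          (PySem.List.pyRange 0 n 1) PySem.Dict.empty c with h | h
      · rw [h, PySem.Dict.getD_empty]
        exact ⟨le_rfl, le_max_left _ _⟩
      · rw [← hkd] at h
        have hm := PySem.List.mem_pyRange_one.mp h
        have := le_max_right (0 : Int) (n - 1)
        exact ⟨hm.1, by omega⟩
  -- A's value is the pairwise-distance sum
  have hA : (word.toList.foldl
      (fun (st : Int × Int) c => (st.1 + |kd.getD c 0 - st.2|, st.2 + (kd.getD c 0 - st.2)))
      (0, 0)).1 = (pairs.map (fun q => |q.2 - q.1|)).sum := by
    have h := loop_eq_pairsum f word.toList 0 0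
    simp only [hf] at h
    rw [h, hpairs, hstops]
    ring
  rw [hA]
  -- B's inner loop is an indicator sum
  have hinner : ∀ (k total : Int),
      pairs.foldl (fun total q =>
        if min q.1 q.2 ≤ k ∧ k < max q.1 q.2 then total + 1 else total) total
      = total + (pairs.map (fun q =>
          if min q.1 q.2 ≤ k ∧ k < max q.1 q.2 then (1 : Int) else 0)).sum := by
    intro k total
    have hc := PySem.List.foldl_congr_mem
      (l := pairs) (init := total)
      (f := fun total q =>
        if min q.1 q.2 ≤ k ∧ k < max q.1 q.2 then total + 1 else total)
      (g := fun total q => total +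
        if min q.1 q.2 ≤ k ∧ k < max q.1 q.2 then (1 : Int) else 0)
      (by intro acc x _; dsimp only; split_ifs <;> ring)
    rw [hc, PySem.List.foldl_add]
  -- B's outer loop, summed, then swapped
  have houter := PySem.List.foldl_congr_mem
    (l := PySem.List.pyRange 0 (n - 1) 1) (init := (0 : Int))
    (f := fun total k => pairs.foldl (fun total q =>
        if min q.1 q.2 ≤ k ∧ k < max q.1 q.2 then total + 1 else total) total)
    (g := fun total k => total + (pairs.map (fun q =>
        if min q.1 q.2 ≤ k ∧ k < max q.1 q.2 then (1 : Int) else 0)).sum)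
    (by intro acc k _; exact hinner k acc)
  rw [houter, PySem.List.foldl_add, zero_add, sum_sum_comm]
  -- each pair contributes exactly its length, by gap-crossing count
  refine congrArg List.sum (List.map_congr_left ?_).symm
  intro q hq
  obtain ⟨a, b⟩ := q
  have hm := List.of_mem_zip (by rw [hpairs] at hq; exact hq)
  have ha := hbound a hm.1
  have hb := hbound b (by rw [hstops]; exact List.mem_cons_of_mem _ hm.2)
  exact crossings n a b ha.1 hb.1 ha.2 hb.2
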